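-- pv_equiv track=rewrite | github.com/mosdef-hub/foyer | foyer/smiles.py | next_branch
-- ===== SOURCE A (Python) =====
-- def next_branch(tokens):
--
--     if not tokens:
--         return [], 0
--
--     if tokens[0] != '(':
--         return tokens, len(tokens)
--     else:
--         in_branch = 1
--         branch = []
--         for t in tokens[1:]:
--             if t == '(':
--                 in_branch += 1
--             elif t == ')':
--                 in_branch -= 1
--                 if in_branch == 0:
--                     return branch, len(branch) + 2
--             else:
--                 branch += t
--     raise SyntaxError("Unbalanced parentheses")
-- ===== SOURCE B (Python) =====
-- def next_branch(tokens):
--     if not tokens: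
--         return [], 0
--     if tokens[0] != '(':
--         return tokens, len(tokens)
--     # pass 1: find index (within tokens[1:]) of the matching closing paren
--     depth = 1
--     close = None
--     for i, t in enumerate(tokens[1:]):
--         if t == '(':
--             depth += 1
--         elif t == ')':
--             depth -= 1
--             if depth == 0:
--                 close = i
--                 break
--     if close is None:
--         raise SyntaxError("Unbalanced parentheses")
--     # pass 2: flatten every non-paren token of the branch into its characters
--     branch = [c for t in tokens[1:1 + close] if t not in ('(', ')') for c in t]
--     return branch, len(branch) + 2
-- ===== Notes on version B (the rewrite author's own statement) =====
-- stated objective: alternative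
-- what changed: B splits A's single accumulating loop into two passes: a depth-tracking scan that only locates the matching close-paren index, then a filter+flatten comprehension that extracts the branch characters, instead of A's loop that interleaves depth bookkeeping with character-by-character accumulation.
import Mathlib
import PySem

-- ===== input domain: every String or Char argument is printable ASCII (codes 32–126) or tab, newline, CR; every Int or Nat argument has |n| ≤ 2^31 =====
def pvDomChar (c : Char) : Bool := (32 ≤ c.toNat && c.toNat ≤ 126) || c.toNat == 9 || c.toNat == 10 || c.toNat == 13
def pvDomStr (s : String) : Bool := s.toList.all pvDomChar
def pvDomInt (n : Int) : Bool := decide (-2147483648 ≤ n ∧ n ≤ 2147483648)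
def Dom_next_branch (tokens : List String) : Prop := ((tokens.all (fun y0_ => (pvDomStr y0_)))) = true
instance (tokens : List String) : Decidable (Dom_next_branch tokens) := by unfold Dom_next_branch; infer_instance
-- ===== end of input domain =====

-- B restructures A's single accumulating loop into two passes (locate the matching ')' index,
-- then filter+flatten the branch tokens); objective: alternative decomposition, same cost.
-- Pre_ excludes inputs with an unmatched leading '(' (A raises SyntaxError there; B raises too).

-- ===== PORT A =====
-- A's loop; `none` = fell through the for-loop (Python raises SyntaxError there).
def nbLoopA : List String → Int → List String → Option (List String × Int)
  | [], _, _ => none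
  | t :: ts, depth, branch =>
    if t = "(" then nbLoopA ts (depth + 1) branch
    else if t = ")" then
      if depth - 1 = 0 then some (branch, (branch.length : Int) + 2)
      else nbLoopA ts (depth - 1) branch
    else nbLoopA ts depth (branch ++ t.toList.map (fun c => String.mk [c]))

def next_branch (tokens : List String) : List String × Int :=
  match tokens with
  | [] => ([], 0)
  | t0 :: rest =>
    if t0 ≠ "(" then (tokens, (tokens.length : Int))
    else (nbLoopA rest 1 []).getD ([], 0)   -- none only outside Pre_ (SyntaxError)

-- ===== PORT B =====
-- pass 1 of Source B: enumerate with running depth, return index of the matching ')'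
def nbFindClose : List String → Int → Nat → Option Nat
  | [], _, _ => none
  | t :: ts, depth, i =>
    if t = "(" then nbFindClose ts (depth + 1) (i + 1)
    else if t = ")" then
      if depth - 1 = 0 then some i else nbFindClose ts (depth - 1) (i + 1)
    else nbFindClose ts depth (i + 1)

-- pass 2 of Source B: the comprehension [c for t in … if t not in ('(',')') for c in t]
def nbExtract (l : List String) : List String :=
  (l.filter (fun t => !(t == "(" || t == ")"))).flatMap (fun t => t.toList.map (fun c => String.mk [c]))

def next_branch_alt (tokens : List String) : List String × Int :=
  match tokens with
  | [] => ([], 0)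
  | t0 :: rest =>
    if t0 ≠ "(" then (tokens, (tokens.length : Int))
    else
      match nbFindClose rest 1 0 with
      | none => ([], 0)   -- SyntaxError in Source B, outside Pre_
      | some close =>
        let branch := nbExtract (rest.take close)
        (branch, (branch.length : Int) + 2)

-- ===== PRECONDITION & SPEC =====
-- Pre_ excludes exactly the inputs where A raises SyntaxError: a leading '(' whose
-- depth count never returns to zero (no index i with tokens.tail[i] = ")" and equal
-- counts of "(" and ")" before it).
def Pre_next_branch (tokens : List String) : Prop :=
  tokens = [] ∨ tokens.headD "" ≠ "(" ∨
    ∃ i, i < tokens.tail.length ∧ tokens.tail.getD i "" = ")" ∧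
      (tokens.tail.take i).count "(" = (tokens.tail.take i).count ")"

instance (tokens : List String) : Decidable (Pre_next_branch tokens) := by
  unfold Pre_next_branch; infer_instance

def pvWitness_next_branch : List String := ["(", "C", "l", ")"]

def Spec_next_branch (tokens : List String) (out : List String × Int) : Prop := out = next_branch_alt tokens
instance (tokens : List String) (out : List String × Int) : Decidable (Spec_next_branch tokens out) := by unfold Spec_next_branch; infer_instance

-- ===== CLAIM (what is proved, stated in full; the proofs are below) =====
def Claim_equal_next_branch : Prop := ∀ (tokens : List String), Dom_next_branch tokens → Pre_next_branch tokens → Spec_next_branch tokens (next_branch tokens)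

-- ===== LEMMAS AND PROOFS =====

-- shifting the index accumulator of B's first pass
theorem nbFindClose_shift (ts : List String) : ∀ (d : Int) (i : Nat),
    nbFindClose ts d i = (nbFindClose ts d 0).map (i + ·) := by
  induction ts with
  | nil => intro d i; simp [nbFindClose]
  | cons t ts ih =>
    intro d i
    simp only [nbFindClose]
    split_ifs with h1 h2 h3
    · rw [ih, ih (d + 1) 1, Option.map_map]
      cases nbFindClose ts (d + 1) 0 <;> simp
    · simp
    · rw [ih, ih (d - 1) 1, Option.map_map]
      cases nbFindClose ts (d - 1) 0 <;> simp
    · rw [ih, ih d 1, Option.map_map]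
      cases nbFindClose ts d 0 <;> simp

-- A's loop computes exactly B's two passes (also when both fail)
theorem nbLoopA_eq (ts : List String) : ∀ (d : Int) (b : List String),
    nbLoopA ts d b = (nbFindClose ts d 0).map
      (fun i => (b ++ nbExtract (ts.take i), ((b ++ nbExtract (ts.take i)).length : Int) + 2)) := by
  induction ts with
  | nil => intro d b; simp [nbLoopA, nbFindClose]
  | cons t ts ih =>
    intro d b
    simp only [nbLoopA, nbFindClose]
    split_ifs with h1 h2 h3
    · rw [ih, nbFindClose_shift ts (d + 1) 1, Option.map_map]
      cases nbFindClose ts (d + 1) 0 with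
      | none => simp
      | some j => simp [nbExtract, Nat.add_comm 1 j, h1]
    · simp [h2, nbExtract]
    · rw [ih, nbFindClose_shift ts (d - 1) 1, Option.map_map]
      cases nbFindClose ts (d - 1) 0 with
      | none => simp
      | some j => simp [nbExtract, Nat.add_comm 1 j, h2]
    · rw [ih, nbFindClose_shift ts d 1, Option.map_map]
      cases nbFindClose ts d 0 with
      | none => simp
      | some j => simp [nbExtract, Nat.add_comm 1 j, h1, h2, List.append_assoc]

-- inside Pre_, B's first pass succeeds
theorem nbFindClose_isSome (ts : List String) : ∀ (d : Int),
    (∃ i, i < ts.length ∧ ts.getD i "" = ")" ∧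
      d + ((ts.take i).count "(" : Int) = ((ts.take i).count ")" : Int) + 1) →
    (nbFindClose ts d 0).isSome := by
  induction ts with
  | nil => intro d h; simp at h
  | cons t ts ih =>
    intro d h
    obtain ⟨i, hi, hget, hcnt⟩ := h
    simp only [nbFindClose]
    split_ifs with h1 h2 h3
    · -- t = "("
      rw [nbFindClose_shift ts (d + 1) 1, Option.isSome_map]
      cases i with
      | zero => simp [h1] at hget
      | succ j =>
        apply ih (d + 1)
        refine ⟨j, by simpa using hi, by simpa using hget, ?_⟩
        simp [h1] at hcnt
        omega
    · simp
    · -- t = ")", depth stays positive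
      rw [nbFindClose_shift ts (d - 1) 1, Option.isSome_map]
      cases i with
      | zero =>
        exfalso
        simp [h2] at hcnt
        exact h3 (by omega)
      | succ j =>
        apply ih (d - 1)
        refine ⟨j, by simpa using hi, by simpa using hget, ?_⟩
        simp [h2] at hcnt
        omega
    · -- other token
      rw [nbFindClose_shift ts d 1, Option.isSome_map]
      cases i with
      | zero => simp at hget; exact absurd hget h2
      | succ j =>
        apply ih d
        refine ⟨j, by simpa using hi, by simpa using hget, ?_⟩
        simp [h1, h2] at hcnt
        exact hcnt

-- ===== VERDICT (by name: the statement is the Claim_ definition above) =====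
theorem next_branch_spec : Claim_equal_next_branch := by
  intro tokens _hdom hpre
  unfold Spec_next_branch
  match tokens with
  | [] => rfl
  | t0 :: rest =>
    by_cases h0 : t0 = "("
    · have hex : ∃ i, i < rest.length ∧ rest.getD i "" = ")" ∧
          (rest.take i).count "(" = (rest.take i).count ")" := by
        rcases hpre with h | h | h
        · exact absurd h (by simp)
        · exact absurd (by simpa using h0) (by simpa using h)
        · simpa using h
      have hs : (nbFindClose rest 1 0).isSome := by
        apply nbFindClose_isSome rest 1
        obtain ⟨i, hi, hget, hcnt⟩ := hex
        exact ⟨i, hi, hget, by omega⟩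
      obtain ⟨close, hclose⟩ := Option.isSome_iff_exists.mp hs
      simp [next_branch, next_branch_alt, h0, nbLoopA_eq, hclose]
    · simp [next_branch, next_branch_alt, h0]
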